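-- pv_equiv track=rewrite | github.com/prajp98/leetcode | 2369 Check if There is a Valid Partition For The Array.py | validPartition_tabulation
-- ===== SOURCE A (Python) =====
-- def validPartition_tabulation(nums):
--     """
--     Approach 3: Bottom-up Dynamic Programming (Tabulation)
--     ---------------------------------------------------
--     - Build solution iteratively using boolean array
--     - dp[i] = whether valid partition exists for nums[0:i]
--
--     Time Complexity: O(n)
--         - Single pass through array
--         - Constant work for checking each partition
--
--     Space Complexity: O(n)
--         - DP array stores result for each index
--     """
--     n = len(nums)
--     dp = [False] * (n + 1)
--     dp[0] = True
--     for i in range(2, n + 1):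
--         if nums[i - 1] == nums[i - 2] and dp[i - 2]:
--             dp[i] = True
--         if i >= 3 and nums[i - 1] == nums[i - 2] == nums[i - 3] and dp[i - 3]:
--             dp[i] = True
--         if i >= 3 and nums[i - 1] == nums[i - 2] + 1 == nums[i - 3] + 2 and dp[i - 3]:
--             dp[i] = True
--     return dp[n]
-- ===== SOURCE B (Python) =====
-- def validPartition_tabulation(nums):
--     # Graph reachability: cut positions 0..n are nodes; a valid block (pair,
--     # equal triple, ascending triple) starting at i is an edge i -> i+2 / i+3.
--     # Depth-first search with an explicit stack from node 0, visiting only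
--     # reachable cut positions; the answer is whether node n is reached.
--     n = len(nums)
--     reach = {0}
--     stack = [0]
--     while stack:
--         i = stack.pop()
--         js = []
--         if i + 2 <= n and nums[i] == nums[i + 1]:
--             js.append(i + 2)
--         if i + 3 <= n and (nums[i] == nums[i + 1] == nums[i + 2]
--                            or (nums[i + 1] == nums[i] + 1 and nums[i + 2] == nums[i] + 2)):
--             js.append(i + 3)
--         for j in js:
--             if j not in reach:
--                 reach.add(j)
--                 stack.append(j)
--     return n in reach
-- ===== Notes on version B (the rewrite author's own statement) =====
-- stated objective: alternative
-- what changed: Replaces the bottom-up boolean DP table over all prefixes with an explicit-stack depth-first reachability search on the graph of cut positions (edges i->i+2/i+3 for valid blocks), visiting only cut positions actually reachable from 0 and answering whether position n is reached.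
import Mathlib
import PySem

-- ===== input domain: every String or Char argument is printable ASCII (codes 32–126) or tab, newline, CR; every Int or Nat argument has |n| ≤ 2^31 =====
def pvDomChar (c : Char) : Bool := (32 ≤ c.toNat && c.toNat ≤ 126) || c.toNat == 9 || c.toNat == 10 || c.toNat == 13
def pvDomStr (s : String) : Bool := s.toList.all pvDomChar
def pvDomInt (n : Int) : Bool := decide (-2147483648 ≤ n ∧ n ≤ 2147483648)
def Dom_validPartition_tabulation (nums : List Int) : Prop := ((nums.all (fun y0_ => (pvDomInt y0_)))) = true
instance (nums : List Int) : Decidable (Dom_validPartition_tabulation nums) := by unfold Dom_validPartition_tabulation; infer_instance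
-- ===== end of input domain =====

-- B replaces A's bottom-up DP table over all prefixes with an explicit-stack depth-first
-- reachability search on cut positions (edges i → i+2 / i+3 for valid blocks), visiting only
-- reachable positions (alternative algorithm; same worst-case O(n) time).

-- ===== PORT A =====
-- one loop iteration of A: the three sequential `if … : dp[i] = True` statements
def pvStepA (nums : List Int) (dp : List Bool) (i : Int) : List Bool :=
  let dp := if PySem.List.pyGetD nums (i - 1) 0 == PySem.List.pyGetD nums (i - 2) 0
               && PySem.List.pyGetD dp (i - 2) false
            then PySem.List.pySetD dp i true else dp
  let dp := if decide (3 ≤ i)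
               && (PySem.List.pyGetD nums (i - 1) 0 == PySem.List.pyGetD nums (i - 2) 0
                   && PySem.List.pyGetD nums (i - 2) 0 == PySem.List.pyGetD nums (i - 3) 0)
               && PySem.List.pyGetD dp (i - 3) false
            then PySem.List.pySetD dp i true else dp
  let dp := if decide (3 ≤ i)
               && (PySem.List.pyGetD nums (i - 1) 0 == PySem.List.pyGetD nums (i - 2) 0 + 1
                   && PySem.List.pyGetD nums (i - 2) 0 + 1 == PySem.List.pyGetD nums (i - 3) 0 + 2)
               && PySem.List.pyGetD dp (i - 3) false
            then PySem.List.pySetD dp i true else dp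
  dp

-- indices read/written are always in range on every reachable iteration, so the
-- pyGetD/pySetD defaults are never used (exact port of Python's dp[i], nums[i-1])
def validPartition_tabulation (nums : List Int) : Bool :=
  let n : Int := nums.length
  let dp : List Bool := List.replicate (nums.length + 1) false
  let dp := PySem.List.pySetD dp 0 true
  let dp := (PySem.List.pyRange 2 (n + 1) 1).foldl (pvStepA nums) dp
  PySem.List.pyGetD dp n false

-- ===== PORT B =====
-- B's cut positions are Python ints that are always naturals (start 0, edges add 2 or 3),
-- so they are carried as Nat; list reads sit under the `i+2 <= n` / `i+3 <= n` guards
-- (Python's short-circuit `and`), so nums.getD's default is never used (exact port).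
-- successors of cut position i: the `js` list built by the two `if` statements
def pvSucc (nums : List Int) (i : Nat) : List Nat :=
  (if i + 2 ≤ nums.length ∧ nums.getD i 0 = nums.getD (i + 1) 0 then [i + 2] else []) ++
  (if i + 3 ≤ nums.length ∧
      ((nums.getD i 0 = nums.getD (i + 1) 0 ∧ nums.getD (i + 1) 0 = nums.getD (i + 2) 0) ∨
       (nums.getD (i + 1) 0 = nums.getD i 0 + 1 ∧ nums.getD (i + 2) 0 = nums.getD i 0 + 2))
   then [i + 3] else [])

-- body of `for j in js: if j not in reach: reach.add(j); stack.append(j)`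
-- (p.1 is the Python set `reach`, kept duplicate-free exactly as PySem.Set.add does;
--  p.2 is the stack, head = top)
def pvIns (p : List Nat × List Nat) (j : Nat) : List Nat × List Nat :=
  if j ∈ p.1 then p else (p.1 ++ [j], j :: p.2)

-- bookkeeping facts about the inner for-loop, cited by pvDfs's termination proof
theorem pvIns_len (js : List Nat) : ∀ r s : List Nat,
    (js.foldl pvIns (r, s)).1.length + s.length = r.length + (js.foldl pvIns (r, s)).2.length := by
  induction js with
  | nil => intro r s; rfl
  | cons j js ih =>
    intro r s
    simp only [List.foldl_cons, pvIns]
    by_cases h : j ∈ r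
    · simp only [h, if_pos]; exact ih r s
    · simp only [h, if_neg, not_false_iff]
      have := ih (r ++ [j]) (j :: s)
      simp only [List.length_append, List.length_cons, List.length_nil] at this ⊢
      omega

theorem pvIns_grow (js : List Nat) : ∀ r s : List Nat, r.length ≤ (js.foldl pvIns (r, s)).1.length := by
  induction js with
  | nil => intro r s; exact le_rfl
  | cons j js ih =>
    intro r s
    simp only [List.foldl_cons, pvIns]
    by_cases h : j ∈ r
    · simp only [h, if_pos]; exact ih r s
    · simp only [h, if_neg, not_false_iff]
      have := ih (r ++ [j]) (j :: s)
      simp only [List.length_append, List.length_singleton] at this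
      omega

theorem pvIns_nodup (js : List Nat) : ∀ r s : List Nat, r.Nodup → (js.foldl pvIns (r, s)).1.Nodup := by
  induction js with
  | nil => intro r s h; exact h
  | cons j js ih =>
    intro r s h
    simp only [List.foldl_cons, pvIns]
    by_cases hj : j ∈ r
    · simp only [hj, if_pos]; exact ih r s h
    · simp only [hj, if_neg, not_false_iff]
      refine ih _ _ ?_
      simp [List.nodup_append, h]
      exact fun a ha e => hj (e ▸ ha)

theorem pvIns_src (js : List Nat) : ∀ r s : List Nat,
    ∀ x ∈ (js.foldl pvIns (r, s)).1, x ∈ r ∨ x ∈ js := by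
  induction js with
  | nil => intro r s x hx; exact Or.inl hx
  | cons j js ih =>
    intro r s x hx
    simp only [List.foldl_cons, pvIns] at hx
    by_cases hj : j ∈ r
    · simp only [hj, if_pos] at hx
      rcases ih r s x hx with h | h
      · exact Or.inl h
      · exact Or.inr (List.mem_cons_of_mem _ h)
    · simp only [hj, if_neg, not_false_iff] at hx
      rcases ih _ _ x hx with h | h
      · rcases List.mem_append.mp h with h | h
        · exact Or.inl h
        · exact Or.inr (by simp [List.mem_singleton.mp h])
      · exact Or.inr (List.mem_cons_of_mem _ h)

theorem pvIns_stack (js : List Nat) : ∀ r s : List Nat, (∀ x ∈ s, x ∈ r) →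
    ∀ x ∈ (js.foldl pvIns (r, s)).2, x ∈ (js.foldl pvIns (r, s)).1 := by
  induction js with
  | nil => intro r s h x hx; exact h x hx
  | cons j js ih =>
    intro r s h
    simp only [List.foldl_cons, pvIns]
    by_cases hj : j ∈ r
    · simp only [hj, if_pos]; exact ih r s h
    · simp only [hj, if_neg, not_false_iff]
      refine ih _ _ ?_
      intro x hx
      rcases List.mem_cons.mp hx with rfl | hx
      · exact List.mem_append_right _ (List.mem_singleton.mpr rfl)
      · exact List.mem_append_left _ (h x hx)

-- every successor is a cut position ≤ n (cited by the termination proof)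
theorem pvSucc_le (nums : List Int) (i : Nat) : ∀ j ∈ pvSucc nums i, j ≤ nums.length := by
  intro j hj
  unfold pvSucc at hj
  rcases List.mem_append.mp hj with h | h <;> (split at h <;> simp_all)

-- a duplicate-free list of naturals all ≤ m has at most m+1 elements (termination bound)
theorem pv_len_le (l : List Nat) (m : Nat) (hnd : l.Nodup) (hb : ∀ x ∈ l, x ≤ m) :
    l.length ≤ m + 1 := by
  have h1 : l.toFinset.card = l.length := List.toFinset_card_of_nodup hnd
  have h2 : l.toFinset ⊆ Finset.range (m + 1) := by
    intro x hx
    simp only [Finset.mem_range]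
    exact Nat.lt_succ_of_le (hb x (List.mem_toFinset.mp hx))
  calc l.length = l.toFinset.card := h1.symm
    _ ≤ (Finset.range (m + 1)).card := Finset.card_le_card h2
    _ = m + 1 := Finset.card_range _

-- the `while stack:` loop; the invariant arguments (reach duplicate-free, bounded, stack ⊆ reach)
-- only make the loop's termination provable — they do not alter the computation
def pvDfs (nums : List Int) (reach stack : List Nat)
    (hnd : reach.Nodup) (hle : ∀ x ∈ reach, x ≤ nums.length)
    (hsk : ∀ x ∈ stack, x ∈ reach) : List Nat :=
  match stack with
  | [] => reach
  | i :: rest =>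
      pvDfs nums ((pvSucc nums i).foldl pvIns (reach, rest)).1
        ((pvSucc nums i).foldl pvIns (reach, rest)).2
        (pvIns_nodup _ _ _ hnd)
        (fun x hx => by
          rcases pvIns_src _ _ _ x hx with h | h
          · exact hle x h
          · exact pvSucc_le nums i x h)
        (pvIns_stack _ _ _ (fun x hx => hsk x (List.mem_cons_of_mem _ hx)))
termination_by 2 * (nums.length + 2 - reach.length) + stack.length
decreasing_by
  have hlen := pvIns_len (pvSucc nums i) reach rest
  have hgrow := pvIns_grow (pvSucc nums i) reach rest
  have hb : ((pvSucc nums i).foldl pvIns (reach, rest)).1.length ≤ nums.length + 1 := by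
    refine pv_len_le _ _ (pvIns_nodup _ _ _ hnd) ?_
    intro x hx
    rcases pvIns_src _ _ _ x hx with h | h
    · exact hle x h
    · exact pvSucc_le nums i x h
  simp only [List.length_cons]
  omega

def validPartition_tabulation_alt (nums : List Int) : Bool :=
  (pvDfs nums [0] [0] (by simp) (by simp) (by simp)).contains nums.length

-- ===== PRECONDITION & SPEC =====
def Spec_validPartition_tabulation (nums : List Int) (out : Bool) : Prop := out = validPartition_tabulation_alt nums
instance (nums : List Int) (out : Bool) : Decidable (Spec_validPartition_tabulation nums out) := by unfold Spec_validPartition_tabulation; infer_instance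

-- ===== CLAIM (what is proved, stated in full; the proofs are below) =====
def Claim_equal_validPartition_tabulation : Prop := ∀ (nums : List Int), Dom_validPartition_tabulation nums → Spec_validPartition_tabulation nums (validPartition_tabulation nums)

-- ===== LEMMAS AND PROOFS =====

-- whether a list admits a valid partition into blocks [x,x], [x,x,x], [x,x+1,x+2] (peeled from the front)
def pvCan : List Int → Bool
  | [] => true
  | [_] => false
  | [a, b] => a == b
  | a :: b :: c :: t =>
      (a == b && pvCan (c :: t)) || (((a == b && b == c) || (b == a + 1 && c == a + 2)) && pvCan t)

-- peel-from-the-back characterisation of pvCan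
theorem pv_shuffle : ∀ p q r t c1 c2 c3 c4 : Bool,
    (p && (r && c1 || t && c3) || q && (r && c2 || t && c4))
      = (r && (p && c1 || q && c2) || t && (p && c3 || q && c4)) := by decide

theorem pvCan_append3 (l : List Int) (w x y : Int) :
    pvCan (l ++ [w, x, y]) =
      (((x == y) && pvCan (l ++ [w])) ||
       (((w == x && x == y) || (x == w + 1 && y == w + 2)) && pvCan l)) := by
  induction l using pvCan.induct with
  | case1 =>
    simp only [List.nil_append, pvCan]
    generalize (w == x) = p; generalize (x == y) = q
    generalize (x == w + 1) = r; generalize (y == w + 2) = s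
    revert p q r s; decide
  | case2 a =>
    simp only [List.cons_append, List.nil_append, pvCan]
    generalize (a == w) = p; generalize (w == x) = q; generalize (x == y) = r
    generalize (x == a + 1) = s; generalize (y == a + 2) = t'
    generalize (x == w + 1) = u; generalize (y == w + 2) = v
    generalize (w == a + 1) = z; generalize (x == a + 2) = z2
    revert p q r s t' u v z z2; decide
  | case3 a b =>
    simp only [List.cons_append, List.nil_append, pvCan]
    generalize (a == b) = p; generalize (b == w) = q; generalize (w == x) = r
    generalize (x == y) = s; generalize (w == a + 1) = t1; generalize (x == a + 2) = t2
    generalize (x == b + 1) = t3; generalize (y == b + 2) = t4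
    generalize (x == w + 1) = t5; generalize (y == w + 2) = t6
    generalize (b == a + 1) = t7; generalize (w == a + 2) = t8
    revert p q r s t1 t2 t3 t4 t5 t6 t7 t8; decide
  | case4 a b c t ih1 ih2 =>
    simp only [List.cons_append] at ih1 ih2 ⊢
    simp only [pvCan]
    rw [ih1, ih2]
    exact pv_shuffle (a == b) ((a == b && b == c) || (b == a + 1 && c == a + 2))
      (x == y) ((w == x && x == y) || (x == w + 1 && y == w + 2))
      (pvCan (c :: (t ++ [w]))) (pvCan (t ++ [w])) (pvCan (c :: t)) (pvCan t)

-- elementary getD/set helpers used by the table invariant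
theorem pv_getD_set_eq (l : List Bool) (i : Nat) (v : Bool) (h : i < l.length) :
    (l.set i v).getD i false = v := by
  simp [List.getD_eq_getElem?_getD, h]

theorem pv_getD_set_ne (l : List Bool) (i j : Nat) (v : Bool) (h : i ≠ j) :
    (l.set i v).getD j false = l.getD j false := by
  simp [List.getD_eq_getElem?_getD, List.getElem?_set_ne h]

theorem pv_take_succ_getD (nums : List Int) (j : Nat) (h : j < nums.length) :
    nums.take (j + 1) = nums.take j ++ [nums.getD j 0] := by
  rw [List.take_add_one, List.getElem?_eq_getElem h, List.getD_eq_getElem _ _ h]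
  rfl

-- pvCan on short prefixes
theorem pvCan_take_one (nums : List Int) (h : 1 ≤ nums.length) :
    pvCan (nums.take 1) = false := by
  match nums with
  | a :: t => simp [pvCan]

theorem pvCan_take_two (nums : List Int) (h : 2 ≤ nums.length) :
    pvCan (nums.take 2) = (nums.getD 0 0 == nums.getD 1 0) := by
  match nums with
  | a :: b :: t => simp [pvCan]

-- A's three-branch recurrence computes pvCan of the prefix (i = m+3 ≥ 3)
theorem pvCan_take_step3 (nums : List Int) (m : Nat) (h : m + 3 ≤ nums.length) :
    pvCan (nums.take (m + 3)) =
      (((nums.getD (m + 1) 0 == nums.getD (m + 2) 0) && pvCan (nums.take (m + 1))) ||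
       (((nums.getD m 0 == nums.getD (m + 1) 0 && nums.getD (m + 1) 0 == nums.getD (m + 2) 0) ||
         (nums.getD (m + 1) 0 == nums.getD m 0 + 1 && nums.getD (m + 2) 0 == nums.getD m 0 + 2)) &&
        pvCan (nums.take m))) := by
  have h0 : m < nums.length := by omega
  have h1 : m + 1 < nums.length := by omega
  have h2 : m + 2 < nums.length := by omega
  have e2 : nums.take (m + 3) = nums.take m ++
      [nums.getD m 0, nums.getD (m + 1) 0, nums.getD (m + 2) 0] := by
    rw [show m + 3 = (m + 2) + 1 from rfl, pv_take_succ_getD nums (m+2) h2,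
        show m + 2 = (m + 1) + 1 from rfl, pv_take_succ_getD nums (m+1) h1,
        pv_take_succ_getD nums m h0]
    simp
  have e1 : nums.take (m + 1) = nums.take m ++ [nums.getD m 0] :=
    pv_take_succ_getD nums m h0
  rw [e2, pvCan_append3, ← e1]

-- a single `if cond: dp[i] = True` statement, seen through length/getD
theorem pv_if_length (dp : List Bool) (i : Nat) (C : Bool) :
    (if C = true then dp.set i true else dp).length = dp.length := by
  cases C <;> simp

theorem pv_if_getD_ne (dp : List Bool) (i j : Nat) (C : Bool) (h : j ≠ i) :
    (if C = true then dp.set i true else dp).getD j false = dp.getD j false := by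
  cases C with
  | false => simp
  | true => simpa using pv_getD_set_ne dp i j true (fun e => h e.symm)

theorem pv_if_getD_self (dp : List Bool) (i : Nat) (C : Bool) (hi : i < dp.length) :
    (if C = true then dp.set i true else dp).getD i false = (dp.getD i false || C) := by
  cases C with
  | false => simp
  | true => rw [if_pos rfl, pv_getD_set_eq dp i true hi]; simp

-- what one iteration of A's loop does to the table (i ≥ 2, table long enough)
theorem pvStepA_spec (nums : List Int) (d : List Bool) (i : Nat)
    (h2 : 2 ≤ i) (hi : i ≤ nums.length) (hlen : d.length = nums.length + 1) :
    (pvStepA nums d (i : Int)).length = d.length ∧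
    (∀ j : Nat, j ≠ i → (pvStepA nums d (i : Int)).getD j false = d.getD j false) ∧
    ((pvStepA nums d (i : Int)).getD i false =
      (d.getD i false ||
       ((nums.getD (i-1) 0 == nums.getD (i-2) 0) && d.getD (i-2) false) ||
       (decide (3 ≤ i) && (nums.getD (i-1) 0 == nums.getD (i-2) 0 &&
           nums.getD (i-2) 0 == nums.getD (i-3) 0) && d.getD (i-3) false) ||
       (decide (3 ≤ i) && (nums.getD (i-1) 0 == nums.getD (i-2) 0 + 1 &&
           nums.getD (i-2) 0 + 1 == nums.getD (i-3) 0 + 2) && d.getD (i-3) false))) := by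
  have e1 : (i : Int) - 1 = ((i - 1 : Nat) : Int) := by omega
  have e2 : (i : Int) - 2 = ((i - 2 : Nat) : Int) := by omega
  have hiL : i < d.length := by omega
  by_cases h3 : 3 ≤ i
  · have e3 : (i : Int) - 3 = ((i - 3 : Nat) : Int) := by omega
    have e4 : (decide ((3:Int) ≤ (i : Int))) = decide (3 ≤ i) := by simp
    unfold pvStepA
    rw [e1, e2, e3]
    simp only [PySem.List.pyGetD_natCast, PySem.List.pySetD_natCast, e4]
    refine ⟨?_, ?_, ?_⟩
    · rw [pv_if_length, pv_if_length, pv_if_length]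
    · intro j hj
      rw [pv_if_getD_ne _ _ _ _ hj, pv_if_getD_ne _ _ _ _ hj, pv_if_getD_ne _ _ _ _ hj]
    · rw [pv_if_getD_ne _ _ (i-3) _ (by omega), pv_if_getD_ne _ _ (i-3) _ (by omega)]
      rw [pv_if_getD_self _ _ _ (by rw [pv_if_length, pv_if_length]; exact hiL)]
      rw [pv_if_getD_self _ _ _ (by rw [pv_if_length]; exact hiL)]
      rw [pv_if_getD_self _ _ _ hiL]
  · have e4 : (decide ((3:Int) ≤ (i : Int))) = false := by simp; omega
    unfold pvStepA
    rw [e1, e2]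
    simp only [PySem.List.pyGetD_natCast, PySem.List.pySetD_natCast, e4,
               Bool.false_and, if_neg (by simp : ¬ (false = true))]
    have e5 : decide (3 ≤ i) = false := by simp; omega
    rw [e5]
    refine ⟨pv_if_length _ _ _, fun j hj => pv_if_getD_ne _ _ _ _ hj, ?_⟩
    rw [pv_if_getD_self _ _ _ hiL]
    simp

-- Int beq is symmetric; A tests nums[i-1]==nums[i-2] where pvCan tests the pair left-to-right
theorem pv_beq_comm (a b : Int) : (a == b) = (b == a) := by
  apply Bool.eq_iff_iff.mpr
  simp only [beq_iff_eq]
  omega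

-- A's third chained comparison (y == x+1 == w+2) is the ascending-triple test (x = w+1 ∧ y = w+2)
theorem pv_arith (w x y : Int) :
    ((y == x + 1) && (x + 1 == w + 2)) = ((x == w + 1) && (y == w + 2)) := by
  apply Bool.eq_iff_iff.mpr
  simp only [Bool.and_eq_true, beq_iff_eq]
  omega

-- the loop invariant: after the iterations i = 2 … m the table holds pvCan of every prefix ≤ m
theorem pvA_inv (nums : List Int) (m : Nat) (hm : m ≤ nums.length) :
    ((PySem.List.pyRange 2 ((m : Int) + 1) 1).foldl (pvStepA nums)
        (PySem.List.pySetD (List.replicate (nums.length + 1) false) 0 true)).length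
        = nums.length + 1 ∧
    (∀ j : Nat, j ≤ m →
      ((PySem.List.pyRange 2 ((m : Int) + 1) 1).foldl (pvStepA nums)
        (PySem.List.pySetD (List.replicate (nums.length + 1) false) 0 true)).getD j false
        = pvCan (nums.take j)) ∧
    (∀ j : Nat, m < j →
      ((PySem.List.pyRange 2 ((m : Int) + 1) 1).foldl (pvStepA nums)
        (PySem.List.pySetD (List.replicate (nums.length + 1) false) 0 true)).getD j false
        = false) := by
  have hD0 : PySem.List.pySetD (List.replicate (nums.length + 1) false) 0 true
      = (List.replicate (nums.length + 1) false).set 0 true := by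
    rw [show (0:Int) = ((0:Nat):Int) from rfl, PySem.List.pySetD_natCast]
  have hD0len : ((List.replicate (nums.length + 1) false).set 0 true).length
      = nums.length + 1 := by simp
  have hD0zero : ((List.replicate (nums.length + 1) false).set 0 true).getD 0 false = true :=
    pv_getD_set_eq _ 0 true (by simp)
  have hD0pos : ∀ j : Nat, 0 < j →
      ((List.replicate (nums.length + 1) false).set 0 true).getD j false = false := by
    intro j hj
    rw [pv_getD_set_ne _ 0 j true (by omega)]
    simp only [List.getD_eq_getElem?_getD, List.getElem?_replicate]
    split <;> rfl
  induction m with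
  | zero =>
    rw [show ((0:Nat):Int) + 1 = 1 from by norm_num,
        PySem.List.pyRange_one_eq_nil (by norm_num), List.foldl_nil, hD0]
    exact ⟨hD0len, fun j hj => by
      rw [Nat.le_zero.mp hj]; simpa [pvCan] using hD0zero, hD0pos⟩
  | succ m ih =>
    obtain ⟨hlen, hval, hfresh⟩ := ih (by omega)
    cases m with
    | zero =>
      rw [show ((1:Nat):Int) + 1 = 2 from by norm_num,
          PySem.List.pyRange_one_eq_nil (by norm_num), List.foldl_nil, hD0]
      refine ⟨hD0len, fun j hj => ?_, fun j hj => hD0pos j (by omega)⟩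
      match j, hj with
      | 0, _ => simpa [pvCan] using hD0zero
      | 1, _ => rw [hD0pos 1 (by omega), pvCan_take_one nums (by omega)]
    | succ m' =>
      have hcast : ((m' + 1 + 1 : Nat) : Int) + 1 = ((((m' + 1 : Nat) : Int)) + 1) + 1 := by
        push_cast; ring
      rw [hcast, PySem.List.pyRange_one_succ_right (by
            have : (1:Int) ≤ ((m' + 1 : Nat) : Int) := by exact_mod_cast Nat.succ_le_succ (Nat.zero_le m')
            omega),
          List.foldl_append, List.foldl_cons, List.foldl_nil]
      have hcast2 : (((m' + 1 : Nat) : Int)) + 1 = ((m' + 2 : Nat) : Int) := by push_cast; ring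
      set d := (PySem.List.pyRange 2 (((m' + 1 : Nat) : Int) + 1) 1).foldl (pvStepA nums)
        (PySem.List.pySetD (List.replicate (nums.length + 1) false) 0 true) with hd
      rw [hcast2]
      obtain ⟨slen, sne, sself⟩ := pvStepA_spec nums d (m' + 2) (by omega) (by omega) hlen
      refine ⟨by rw [slen, hlen], fun j hj => ?_, fun j hj => ?_⟩
      · rcases eq_or_ne j (m' + 2) with rfl | hne
        · rw [sself]
          have n1 : m' + 2 - 1 = m' + 1 := by omega
          have n2 : m' + 2 - 2 = m' := by omega
          have n3 : m' + 2 - 3 = m' - 1 := by omega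
          rw [n1, n2, n3, hfresh (m' + 2) (by omega), hval m' (by omega)]
          cases m' with
          | zero =>
            rw [show (decide (3 ≤ 0 + 2)) = false from by decide]
            rw [pvCan_take_two nums (by omega)]
            rw [show nums.take 0 = ([] : List Int) from rfl]
            rw [pv_beq_comm (nums.getD (0+1) 0) (nums.getD 0 0)]
            simp [pvCan]
          | succ k =>
            rw [show k + 1 - 1 = k from by omega]
            rw [hval k (by omega)]
            rw [show (decide (3 ≤ k + 1 + 2)) = true from by simp]
            rw [pvCan_take_step3 nums k (by omega)]
            rw [pv_beq_comm (nums.getD (k + 1 + 1) 0) (nums.getD (k + 1) 0),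
                pv_beq_comm (nums.getD (k + 1) 0) (nums.getD k 0),
                pv_arith (nums.getD k 0) (nums.getD (k + 1) 0) (nums.getD (k + 1 + 1) 0)]
            generalize (nums.getD (k + 1) 0 == nums.getD (k + 1 + 1) 0) = p
            generalize (nums.getD k 0 == nums.getD (k + 1) 0) = q
            generalize (nums.getD (k + 1) 0 == nums.getD k 0 + 1) = r
            generalize (nums.getD (k + 1 + 1) 0 == nums.getD k 0 + 2) = s
            generalize pvCan (nums.take (k + 1)) = c1
            generalize pvCan (nums.take k) = c2
            revert p q r s c1 c2; decide
        · rw [sne j hne, hval j (by omega)]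
      · rw [sne j (by omega), hfresh j (by omega)]

-- A's port returns pvCan of the whole list
theorem pvA_eq_can (nums : List Int) : validPartition_tabulation nums = pvCan nums := by
  unfold validPartition_tabulation
  obtain ⟨hlen, hinv, -⟩ := pvA_inv nums nums.length le_rfl
  simp only []
  rw [PySem.List.pyGetD_natCast]
  rw [hinv nums.length le_rfl, List.take_length]

-- ==== B-side correctness: the DFS reaches the cut positions of partitionable prefixes ====

-- membership in the successor list, spelled out
theorem mem_pvSucc (nums : List Int) (i j : Nat) :
    j ∈ pvSucc nums i ↔
      (j = i + 2 ∧ i + 2 ≤ nums.length ∧ nums.getD i 0 = nums.getD (i + 1) 0) ∨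
      (j = i + 3 ∧ i + 3 ≤ nums.length ∧
        ((nums.getD i 0 = nums.getD (i + 1) 0 ∧ nums.getD (i + 1) 0 = nums.getD (i + 2) 0) ∨
         (nums.getD (i + 1) 0 = nums.getD i 0 + 1 ∧ nums.getD (i + 2) 0 = nums.getD i 0 + 2))) := by
  unfold pvSucc
  split_ifs with h1 h2 h2 <;> simp_all

-- an edge preserves partitionability of the prefix
theorem pvSucc_good (nums : List Int) (i j : Nat)
    (hg : pvCan (nums.take i) = true) (hj : j ∈ pvSucc nums i) :
    pvCan (nums.take j) = true := by
  rcases (mem_pvSucc nums i j).mp hj with ⟨rfl, hn, he⟩ | ⟨rfl, hn, he⟩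
  · cases i with
    | zero =>
      rw [pvCan_take_two nums (by omega)]
      simpa using he
    | succ m =>
      rw [show m + 1 + 2 = m + 3 from rfl] at hn ⊢
      rw [pvCan_take_step3 nums m hn]
      have e : (nums.getD (m + 1) 0 == nums.getD (m + 2) 0) = true := by
        rw [show m + 2 = m + 1 + 1 from rfl]; exact beq_iff_eq.mpr he
      rw [e, hg]
      simp
  · have hY : (((nums.getD i 0 == nums.getD (i + 1) 0) &&
        (nums.getD (i + 1) 0 == nums.getD (i + 2) 0)) ||
        ((nums.getD (i + 1) 0 == nums.getD i 0 + 1) &&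
         (nums.getD (i + 2) 0 == nums.getD i 0 + 2))) = true := by
      rcases he with ⟨e1, e2⟩ | ⟨e1, e2⟩ <;>
        rw [beq_iff_eq.mpr e1, beq_iff_eq.mpr e2] <;> simp
    rw [pvCan_take_step3 nums i hn, hY, hg]
    simp

theorem pvIns_mono (js : List Nat) : ∀ r s : List Nat, ∀ x ∈ r, x ∈ (js.foldl pvIns (r, s)).1 := by
  induction js with
  | nil => intro r s x hx; exact hx
  | cons j js ih =>
    intro r s x hx
    simp only [List.foldl_cons, pvIns]
    by_cases hj : j ∈ r
    · simp only [hj, if_pos]; exact ih r s x hx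
    · simp only [hj, if_neg, not_false_iff]
      exact ih _ _ x (List.mem_append_left _ hx)

-- the inner for-loop puts every successor into reach
theorem pvIns_all (js : List Nat) : ∀ r s : List Nat, ∀ j ∈ js, j ∈ (js.foldl pvIns (r, s)).1 := by
  induction js with
  | nil => intro r s j hj; cases hj
  | cons j js ih =>
    intro r s x hx
    simp only [List.foldl_cons, pvIns]
    by_cases hj : j ∈ r
    · simp only [hj, if_pos]
      rcases List.mem_cons.mp hx with rfl | hx
      · exact pvIns_mono js r s x hj
      · exact ih r s x hx
    · simp only [hj, if_neg, not_false_iff]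
      rcases List.mem_cons.mp hx with rfl | hx
      · exact pvIns_mono js _ _ x (List.mem_append_right _ (List.mem_singleton.mpr rfl))
      · exact ih _ _ x hx

-- the old stack survives inside the new stack
theorem pvIns_stkmono (js : List Nat) : ∀ r s : List Nat, ∀ x ∈ s, x ∈ (js.foldl pvIns (r, s)).2 := by
  induction js with
  | nil => intro r s x hx; exact hx
  | cons j js ih =>
    intro r s x hx
    simp only [List.foldl_cons, pvIns]
    by_cases hj : j ∈ r
    · simp only [hj, if_pos]; exact ih r s x hx
    · simp only [hj, if_neg, not_false_iff]
      exact ih _ _ x (List.mem_cons_of_mem _ hx)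

-- every element of the new reach was already reached or is on the new stack
theorem pvIns_added (js : List Nat) : ∀ r s : List Nat,
    ∀ x ∈ (js.foldl pvIns (r, s)).1, x ∈ r ∨ x ∈ (js.foldl pvIns (r, s)).2 := by
  induction js with
  | nil => intro r s x hx; exact Or.inl hx
  | cons j js ih =>
    intro r s x hx
    simp only [List.foldl_cons, pvIns] at hx ⊢
    by_cases hj : j ∈ r
    · simp only [hj, if_pos] at hx ⊢; exact ih r s x hx
    · simp only [hj, if_neg, not_false_iff] at hx ⊢
      rcases ih _ _ x hx with h | h
      · rcases List.mem_append.mp h with h | h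
        · exact Or.inl h
        · refine Or.inr ?_
          have : x ∈ j :: s := by simpa using Or.inl (List.mem_singleton.mp h)
          exact pvIns_stkmono js _ _ x this
      · exact Or.inr h

-- the DFS: everything reached stays, everything returned is a partitionable cut, and the
-- returned set is closed under edges
theorem pvDfs_spec (nums : List Int) (reach stack : List Nat)
    (hnd : reach.Nodup) (hle : ∀ x ∈ reach, x ≤ nums.length) (hsk : ∀ x ∈ stack, x ∈ reach) :
    (∀ x ∈ reach, pvCan (nums.take x) = true) →
    (∀ x ∈ reach, x ∉ stack → ∀ j ∈ pvSucc nums x, j ∈ reach) →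
    (∀ x ∈ reach, x ∈ pvDfs nums reach stack hnd hle hsk) ∧
    (∀ x ∈ pvDfs nums reach stack hnd hle hsk, pvCan (nums.take x) = true) ∧
    (∀ x ∈ pvDfs nums reach stack hnd hle hsk,
      ∀ j ∈ pvSucc nums x, j ∈ pvDfs nums reach stack hnd hle hsk) := by
  fun_induction pvDfs nums reach stack hnd hle hsk with
  | case1 reach hnd hle hsk =>
    intro hsound hclosed
    exact ⟨fun x hx => hx, hsound, fun x hx => hclosed x hx (by simp)⟩
  | case2 reach hnd hle i rest hsk hsk2 ih =>
    intro hsound hclosed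
    have hiR : i ∈ reach := hsk i List.mem_cons_self
    have hgi : pvCan (nums.take i) = true := hsound i hiR
    have hsound' : ∀ x ∈ ((pvSucc nums i).foldl pvIns (reach, rest)).1,
        pvCan (nums.take x) = true := by
      intro x hx
      rcases pvIns_src _ _ _ x hx with h | h
      · exact hsound x h
      · exact pvSucc_good nums i x hgi h
    have hclosed' : ∀ x ∈ ((pvSucc nums i).foldl pvIns (reach, rest)).1,
        x ∉ ((pvSucc nums i).foldl pvIns (reach, rest)).2 →
        ∀ j ∈ pvSucc nums x, j ∈ ((pvSucc nums i).foldl pvIns (reach, rest)).1 := by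
      intro x hx hnx j hj
      rcases pvIns_added _ _ _ x hx with hxr | hxs
      · by_cases hxi : x = i
        · subst hxi; exact pvIns_all _ _ _ j hj
        · have hxns : x ∉ (i :: rest) := by
            intro hmem
            rcases List.mem_cons.mp hmem with rfl | hmem
            · exact hxi rfl
            · exact hnx (pvIns_stkmono _ _ _ x hmem)
          exact pvIns_mono _ _ _ j (hclosed x hxr hxns j hj)
      · exact absurd hxs hnx
    obtain ⟨m1, m2, m3⟩ := ih hsound' hclosed'
    exact ⟨fun x hx => m1 x (pvIns_mono _ _ _ x hx), m2, m3⟩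

-- partitionable prefixes are reachable: any edge-closed superset of {0} contains them
theorem pv_complete (nums : List Int) (R : List Nat) (h0 : (0 : Nat) ∈ R)
    (hcl : ∀ x ∈ R, ∀ j ∈ pvSucc nums x, j ∈ R) :
    ∀ j, j ≤ nums.length → pvCan (nums.take j) = true → j ∈ R := by
  intro j
  induction j using Nat.strong_induction_on with
  | _ j ih =>
    match j with
    | 0 => intro _ _; exact h0
    | 1 =>
      intro hn hc
      rw [pvCan_take_one nums hn] at hc
      cases hc
    | 2 =>
      intro hn hc
      rw [pvCan_take_two nums hn] at hc
      refine hcl 0 h0 2 ?_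
      exact (mem_pvSucc nums 0 2).mpr (Or.inl ⟨rfl, hn, by simpa using hc⟩)
    | (m + 3) =>
      intro hn hc
      rw [pvCan_take_step3 nums m hn] at hc
      rcases Bool.or_eq_true_iff.mp hc with h | h
      · obtain ⟨he, hp⟩ := Bool.and_eq_true_iff.mp h
        have hm1 : m + 1 ∈ R := ih (m + 1) (by omega) (by omega) hp
        refine hcl (m + 1) hm1 (m + 3) ?_
        exact (mem_pvSucc nums (m + 1) (m + 3)).mpr
          (Or.inl ⟨rfl, by omega, by simpa using he⟩)
      · obtain ⟨he, hp⟩ := Bool.and_eq_true_iff.mp h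
        have hm : m ∈ R := ih m (by omega) (by omega) hp
        refine hcl m hm (m + 3) ?_
        refine (mem_pvSucc nums m (m + 3)).mpr (Or.inr ⟨rfl, hn, ?_⟩)
        rcases Bool.or_eq_true_iff.mp he with h' | h' <;>
          [exact Or.inl (by simpa using Bool.and_eq_true_iff.mp h');
           exact Or.inr (by simpa using Bool.and_eq_true_iff.mp h')]

-- B's port returns pvCan of the whole list
theorem pvB_eq_can (nums : List Int) : validPartition_tabulation_alt nums = pvCan nums := by
  unfold validPartition_tabulation_alt
  obtain ⟨hmono, hsound, hcl⟩ :=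
    pvDfs_spec nums [0] [0] (by simp) (by simp) (by simp)
      (by intro x hx; simp at hx; subst hx; simp [pvCan])
      (by intro x hx hnx; simp at hx; subst hx; simp at hnx)
  have h0 : (0 : Nat) ∈ pvDfs nums [0] [0] (by simp) (by simp) (by simp) :=
    hmono 0 (by simp)
  cases hc : pvCan nums with
  | true =>
    have hm : nums.length ∈ pvDfs nums [0] [0] (by simp) (by simp) (by simp) :=
      pv_complete nums _ h0 hcl nums.length le_rfl (by rw [List.take_length]; exact hc)
    simpa using hm
  | false =>
    have hnm : nums.length ∉ pvDfs nums [0] [0] (by simp) (by simp) (by simp) := by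
      intro hmem
      have h := hsound nums.length hmem
      rw [List.take_length, hc] at h
      cases h
    simpa using hnm

-- ===== VERDICT (by name: the statement is the Claim_ definition above) =====
theorem validPartition_tabulation_spec : Claim_equal_validPartition_tabulation := by
  intro nums _
  unfold Spec_validPartition_tabulation
  rw [pvB_eq_can, pvA_eq_can]
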